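-- pv_equiv track=rewrite | github.com/jonleewh/DSA4264-Project | src/stem_test/stem_1_generate_scope_classifications.py | _classify_values
-- ===== SOURCE A (Python) =====
-- def _classify_values(
--     values: list[str],
--     clear_stem: set[str] | None = None,
--     clear_non_stem: set[str] | None = None,
--     unclear_or_mixed: set[str] | None = None,
--     default_bucket: str = "unclear_or_mixed",
--     include_clear_non_stem: bool = False,
-- ) -> dict[str, list[str]]:
--     buckets = {
--         "clear_stem": [],
--         "unclear_or_mixed": [],
--     }
--     if include_clear_non_stem:
--         buckets["clear_non_stem"] = []
--     clear_stem = clear_stem or set()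
--     clear_non_stem = clear_non_stem or set()
--     unclear_or_mixed = unclear_or_mixed or set()
--
--     for value in values:
--         if value in clear_stem:
--             bucket = "clear_stem"
--         elif include_clear_non_stem and value in clear_non_stem:
--             bucket = "clear_non_stem"
--         elif value in unclear_or_mixed:
--             bucket = "unclear_or_mixed"
--         else:
--             bucket = default_bucket
--         buckets[bucket].append(value)
--     for k in buckets:
--         buckets[k] = sorted(set(buckets[k]))
--     return buckets
-- ===== SOURCE B (Python) =====
-- def _classify_values(
--     values,
--     clear_stem=None,
--     clear_non_stem=None,
--     unclear_or_mixed=None,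
--     default_bucket="unclear_or_mixed",
--     include_clear_non_stem=False,
-- ):
--     unique = set(values)
--     cs_vals = unique & set(clear_stem or ())
--     rest = unique - cs_vals
--     buckets = {"clear_stem": cs_vals, "unclear_or_mixed": set()}
--     if include_clear_non_stem:
--         cns_vals = rest & set(clear_non_stem or ())
--         rest -= cns_vals
--         buckets["clear_non_stem"] = cns_vals
--     um_vals = rest & set(unclear_or_mixed or ())
--     rest -= um_vals
--     buckets["unclear_or_mixed"] = um_vals
--     if rest:
--         buckets[default_bucket] |= rest  # KeyError if default_bucket names no bucket, as in the original
--     return {k: sorted(v) for k, v in buckets.items()}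
-- ===== Notes on version B (the rewrite author's own statement) =====
-- stated objective: alternative
-- what changed: A classifies value-by-value in a loop that appends every occurrence into bucket lists and dedup-sorts each bucket at the end; B deduplicates values once and derives each bucket by set algebra (intersection with clear_stem, then clear_non_stem and unclear_or_mixed on the shrinking remainder, the leftover merged into buckets[default_bucket]), sorting each resulting set.
import Mathlib
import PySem

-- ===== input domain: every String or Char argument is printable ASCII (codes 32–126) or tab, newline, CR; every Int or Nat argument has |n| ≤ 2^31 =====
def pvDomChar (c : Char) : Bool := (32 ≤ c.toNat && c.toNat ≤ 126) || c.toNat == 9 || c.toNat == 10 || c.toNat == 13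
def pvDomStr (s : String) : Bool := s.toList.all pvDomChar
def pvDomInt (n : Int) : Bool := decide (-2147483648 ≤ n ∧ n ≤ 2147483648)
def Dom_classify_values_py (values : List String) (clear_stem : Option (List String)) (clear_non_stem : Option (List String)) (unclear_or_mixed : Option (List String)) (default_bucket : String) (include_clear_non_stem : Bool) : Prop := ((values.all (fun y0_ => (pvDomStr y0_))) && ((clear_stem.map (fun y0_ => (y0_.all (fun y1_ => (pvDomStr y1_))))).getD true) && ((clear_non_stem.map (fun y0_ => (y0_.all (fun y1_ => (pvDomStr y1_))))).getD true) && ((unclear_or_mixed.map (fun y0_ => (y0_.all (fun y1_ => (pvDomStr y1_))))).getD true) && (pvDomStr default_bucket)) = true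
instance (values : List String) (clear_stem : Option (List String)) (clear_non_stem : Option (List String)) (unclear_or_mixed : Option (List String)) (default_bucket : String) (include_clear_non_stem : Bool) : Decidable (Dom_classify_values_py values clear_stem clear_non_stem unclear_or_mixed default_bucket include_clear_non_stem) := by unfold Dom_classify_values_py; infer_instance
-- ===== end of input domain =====

-- B replaces A's per-value bucketing loop by one dedup of `values` followed by set
-- algebra (intersections/differences in priority order) on whole buckets; objective:
-- alternative decomposition, same exact result (incl. which inputs raise KeyError).

-- ===== PORT A =====
-- A-side helper: the bucket chosen by the loop body's if/elif chain (exact)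
def pyBucket (cs cns um : List String) (default_bucket : String) (incs : Bool) (v : String) : String :=
  if cs.contains v then "clear_stem"
  else if incs && cns.contains v then "clear_non_stem"
  else if um.contains v then "unclear_or_mixed"
  else default_bucket

def classify_values_py (values : List String) (clear_stem : Option (List String)) (clear_non_stem : Option (List String)) (unclear_or_mixed : Option (List String)) (default_bucket : String) (include_clear_non_stem : Bool) : List (String × List String) :=
  let buckets : PySem.Dict String (List String) :=
    (PySem.Dict.empty.insert "clear_stem" []).insert "unclear_or_mixed" []
  let buckets := if include_clear_non_stem then buckets.insert "clear_non_stem" [] else buckets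
  let cs := clear_stem.getD []
  let cns := clear_non_stem.getD []
  let um := unclear_or_mixed.getD []
  let buckets := values.foldl
    (fun b v => b.modify (pyBucket cs cns um default_bucket include_clear_non_stem v) [] (· ++ [v])) buckets
  let buckets := buckets.keys.foldl
    (fun b k => b.insert k (PySem.List.sorted (PySem.Set.ofList (b.getD k [])) (fun x => x))) buckets
  buckets.items

-- ===== PORT B =====
def classify_values_py_alt (values : List String) (clear_stem : Option (List String)) (clear_non_stem : Option (List String)) (unclear_or_mixed : Option (List String)) (default_bucket : String) (include_clear_non_stem : Bool) : List (String × List String) :=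
  let unique := PySem.Set.ofList values
  let cs_vals := PySem.Set.inter unique (PySem.Set.ofList (clear_stem.getD []))
  let rest := PySem.Set.diff unique cs_vals
  let buckets : PySem.Dict String (PySem.Set String) :=
    (PySem.Dict.empty.insert "clear_stem" cs_vals).insert "unclear_or_mixed" PySem.Set.empty
  let rb :=
    if include_clear_non_stem then
      let cns_vals := PySem.Set.inter rest (PySem.Set.ofList (clear_non_stem.getD []))
      (PySem.Set.diff rest cns_vals, buckets.insert "clear_non_stem" cns_vals)
    else (rest, buckets)
  let um_vals := PySem.Set.inter rb.1 (PySem.Set.ofList (unclear_or_mixed.getD []))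
  let rest := PySem.Set.diff rb.1 um_vals
  let buckets := (rb.2).insert "unclear_or_mixed" um_vals
  let buckets := if rest.isEmpty then buckets
    else buckets.insert default_bucket (PySem.Set.union (buckets.getD default_bucket PySem.Set.empty) rest)
  buckets.items.map (fun kv => (kv.1, PySem.List.sorted kv.2 (fun x => x)))

-- ===== PRECONDITION & SPEC =====
-- Pre_ excludes exactly the inputs where Python A raises KeyError: some value falls through
-- to default_bucket although default_bucket names no bucket (B raises KeyError there too).
def Pre_classify_values_py (values : List String) (clear_stem : Option (List String)) (clear_non_stem : Option (List String)) (unclear_or_mixed : Option (List String)) (default_bucket : String) (include_clear_non_stem : Bool) : Prop :=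
  default_bucket = "clear_stem" ∨ default_bucket = "unclear_or_mixed" ∨
  (include_clear_non_stem = true ∧ default_bucket = "clear_non_stem") ∨
  (∀ v ∈ values, v ∈ clear_stem.getD [] ∨
    (include_clear_non_stem = true ∧ v ∈ clear_non_stem.getD []) ∨ v ∈ unclear_or_mixed.getD [])
instance (values : List String) (clear_stem : Option (List String)) (clear_non_stem : Option (List String)) (unclear_or_mixed : Option (List String)) (default_bucket : String) (include_clear_non_stem : Bool) : Decidable (Pre_classify_values_py values clear_stem clear_non_stem unclear_or_mixed default_bucket include_clear_non_stem) := by unfold Pre_classify_values_py; infer_instance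
def pvWitness_classify_values_py : List String × Option (List String) × Option (List String) × Option (List String) × String × Bool :=
  (["b", "a", "b"], some ["a"], none, none, "unclear_or_mixed", false)

def Spec_classify_values_py (values : List String) (clear_stem : Option (List String)) (clear_non_stem : Option (List String)) (unclear_or_mixed : Option (List String)) (default_bucket : String) (include_clear_non_stem : Bool) (out : List (String × List String)) : Prop := out = classify_values_py_alt values clear_stem clear_non_stem unclear_or_mixed default_bucket include_clear_non_stem
instance (values : List String) (clear_stem : Option (List String)) (clear_non_stem : Option (List String)) (unclear_or_mixed : Option (List String)) (default_bucket : String) (include_clear_non_stem : Bool) (out : List (String × List String)) : Decidable (Spec_classify_values_py values clear_stem clear_non_stem unclear_or_mixed default_bucket include_clear_non_stem out) := by unfold Spec_classify_values_py; infer_instance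

-- ===== CLAIM (what is proved, stated in full; the proofs are below) =====
def Claim_equal_classify_values_py : Prop := ∀ (values : List String) (clear_stem : Option (List String)) (clear_non_stem : Option (List String)) (unclear_or_mixed : Option (List String)) (default_bucket : String) (include_clear_non_stem : Bool), Dom_classify_values_py values clear_stem clear_non_stem unclear_or_mixed default_bucket include_clear_non_stem → Pre_classify_values_py values clear_stem clear_non_stem unclear_or_mixed default_bucket include_clear_non_stem → Spec_classify_values_py values clear_stem clear_non_stem unclear_or_mixed default_bucket include_clear_non_stem (classify_values_py values clear_stem clear_non_stem unclear_or_mixed default_bucket include_clear_non_stem)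

-- ===== LEMMAS AND PROOFS =====
theorem pv_set_update_eq_self {s : PySem.Set String} {l : List String}
    (h : ∀ x ∈ l, x ∈ s) : PySem.Set.update s l = s := by
  induction l with
  | nil => rfl
  | cons x t ih =>
    have hx : PySem.Set.add s x = s := by
      simp [PySem.Set.add, PySem.Set.contains, h x (by simp)]
    simpa [PySem.Set.update, hx] using ih (fun y hy => h y (by simp [hy]))

theorem pv_fold_getD (values : List String) (key : String → String) (d0 : PySem.Dict String (List String)) (c : String) :
    (values.foldl (fun b v => b.modify (key v) [] (· ++ [v])) d0).getD c [] =
      d0.getD c [] ++ values.filter (fun v => key v == c) := by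
  have hm : (values.foldl (fun b v => b.modify (key v) [] fun x => x ++ [v]) d0) =
      List.foldl (fun (d : PySem.Dict String (List String)) (p : String × String) => d.modify p.1 [] fun x => x ++ [p.2]) d0 (values.map (fun v => (key v, v))) :=
    (List.foldl_map (f := fun v => (key v, v)) (g := fun d p => d.modify p.1 [] fun x => x ++ [p.2]) (l := values) (init := d0)).symm
  rw [hm, PySem.Dict.getD_foldl_modify_append]
  simp [List.filter_map, Function.comp_def]

theorem pv_fold_keys (values : List String) (key : String → String) (d0 : PySem.Dict String (List String)) (h : ∀ v ∈ values, key v ∈ d0.keys) :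
    (values.foldl (fun b v => b.modify (key v) [] (· ++ [v])) d0).keys = d0.keys := by
  rw [PySem.Dict.keys_foldl_modify_key values key [] (fun _ v => (· ++ [v])) d0]
  exact pv_set_update_eq_self (by simpa using h)


theorem pv_A_closed (values : List String) (clear_stem clear_non_stem unclear_or_mixed : Option (List String)) (default_bucket : String) (include_clear_non_stem : Bool)
    (hpre : Pre_classify_values_py values clear_stem clear_non_stem unclear_or_mixed default_bucket include_clear_non_stem) :
    classify_values_py values clear_stem clear_non_stem unclear_or_mixed default_bucket include_clear_non_stem =
      ("clear_stem" :: "unclear_or_mixed" :: (if include_clear_non_stem then ["clear_non_stem"] else [])).map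
        (fun k => (k, PySem.List.sorted
          (PySem.Set.ofList (values.filter
            (fun v => pyBucket (clear_stem.getD []) (clear_non_stem.getD []) (unclear_or_mixed.getD []) default_bucket include_clear_non_stem v == k)))
          (fun x => x))) := by
  cases include_clear_non_stem with
  | false =>
    unfold classify_values_py
    simp only [Bool.false_eq_true, if_false]
    rw [show (PySem.Dict.empty.insert "clear_stem" ([] : List String)).insert "unclear_or_mixed" [] =
        PySem.Dict.mk [("clear_stem", []), ("unclear_or_mixed", [])] from rfl]
    have hkm : ∀ v ∈ values, pyBucket (clear_stem.getD []) (clear_non_stem.getD []) (unclear_or_mixed.getD []) default_bucket false v ∈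
        (PySem.Dict.mk [("clear_stem", ([] : List String)), ("unclear_or_mixed", [])]).keys := by
      intro v hv
      show _ ∈ ["clear_stem", "unclear_or_mixed"]
      unfold pyBucket
      split_ifs with h1 h2 h3
      · simp
      · simp at h2
      · simp
      · rcases hpre with h | h | ⟨h, _⟩ | h
        · subst h; simp
        · subst h; simp
        · simp at h
        · rcases h v hv with hc | ⟨hc, _⟩ | hc
          · simp at h1; exact absurd hc h1
          · simp at hc
          · simp at h3; exact absurd hc h3
    rw [pv_fold_keys values _ _ hkm]
    set F := values.foldl
      (fun b v => b.modify (pyBucket (clear_stem.getD []) (clear_non_stem.getD []) (unclear_or_mixed.getD []) default_bucket false v) [] (· ++ [v]))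
      (PySem.Dict.mk [("clear_stem", []), ("unclear_or_mixed", [])]) with hFdef
    have hkeys : F.keys = ["clear_stem", "unclear_or_mixed"] := by
      rw [hFdef, pv_fold_keys values _ _ hkm]; rfl
    have hget := pv_fold_getD values (pyBucket (clear_stem.getD []) (clear_non_stem.getD []) (unclear_or_mixed.getD []) default_bucket false)
      (PySem.Dict.mk [("clear_stem", []), ("unclear_or_mixed", [])])
    have hF : F = PySem.Dict.mk [
        ("clear_stem", values.filter (fun v => pyBucket (clear_stem.getD []) (clear_non_stem.getD []) (unclear_or_mixed.getD []) default_bucket false v == "clear_stem")),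
        ("unclear_or_mixed", values.filter (fun v => pyBucket (clear_stem.getD []) (clear_non_stem.getD []) (unclear_or_mixed.getD []) default_bucket false v == "unclear_or_mixed"))] := by
      apply PySem.Dict.ext
      rw [PySem.Dict.items_eq_map_keys F (by rw [hkeys]; decide) [], hkeys]
      simp only [List.map_cons, List.map_nil, hFdef, hget]
      rfl
    rw [show (PySem.Dict.mk [("clear_stem", ([] : List String)), ("unclear_or_mixed", [])]).keys = ["clear_stem", "unclear_or_mixed"] from rfl, hF]
    simp [List.foldl, PySem.Dict.insert, PySem.Dict.contains, PySem.Dict.getD, PySem.Dict.get?]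
  | true =>
    unfold classify_values_py
    simp only [if_true]
    rw [show ((PySem.Dict.empty.insert "clear_stem" ([] : List String)).insert "unclear_or_mixed" []).insert "clear_non_stem" [] =
        PySem.Dict.mk [("clear_stem", []), ("unclear_or_mixed", []), ("clear_non_stem", [])] from rfl]
    have hkm : ∀ v ∈ values, pyBucket (clear_stem.getD []) (clear_non_stem.getD []) (unclear_or_mixed.getD []) default_bucket true v ∈
        (PySem.Dict.mk [("clear_stem", ([] : List String)), ("unclear_or_mixed", []), ("clear_non_stem", [])]).keys := by
      intro v hv
      show _ ∈ ["clear_stem", "unclear_or_mixed", "clear_non_stem"]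
      unfold pyBucket
      split_ifs with h1 h2 h3
      · simp
      · simp
      · simp
      · rcases hpre with h | h | ⟨_, h⟩ | h
        · subst h; simp
        · subst h; simp
        · subst h; simp
        · rcases h v hv with hc | ⟨_, hc⟩ | hc
          · simp at h1; exact absurd hc h1
          · simp at h2; exact absurd hc h2
          · simp at h3; exact absurd hc h3
    rw [pv_fold_keys values _ _ hkm]
    set F := values.foldl
      (fun b v => b.modify (pyBucket (clear_stem.getD []) (clear_non_stem.getD []) (unclear_or_mixed.getD []) default_bucket true v) [] (· ++ [v]))
      (PySem.Dict.mk [("clear_stem", []), ("unclear_or_mixed", []), ("clear_non_stem", [])]) with hFdef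
    have hkeys : F.keys = ["clear_stem", "unclear_or_mixed", "clear_non_stem"] := by
      rw [hFdef, pv_fold_keys values _ _ hkm]; rfl
    have hget := pv_fold_getD values (pyBucket (clear_stem.getD []) (clear_non_stem.getD []) (unclear_or_mixed.getD []) default_bucket true)
      (PySem.Dict.mk [("clear_stem", []), ("unclear_or_mixed", []), ("clear_non_stem", [])])
    have hF : F = PySem.Dict.mk [
        ("clear_stem", values.filter (fun v => pyBucket (clear_stem.getD []) (clear_non_stem.getD []) (unclear_or_mixed.getD []) default_bucket true v == "clear_stem")),
        ("unclear_or_mixed", values.filter (fun v => pyBucket (clear_stem.getD []) (clear_non_stem.getD []) (unclear_or_mixed.getD []) default_bucket true v == "unclear_or_mixed")),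
        ("clear_non_stem", values.filter (fun v => pyBucket (clear_stem.getD []) (clear_non_stem.getD []) (unclear_or_mixed.getD []) default_bucket true v == "clear_non_stem"))] := by
      apply PySem.Dict.ext
      rw [PySem.Dict.items_eq_map_keys F (by rw [hkeys]; decide) [], hkeys]
      simp only [List.map_cons, List.map_nil, hFdef, hget]
      rfl
    rw [show (PySem.Dict.mk [("clear_stem", ([] : List String)), ("unclear_or_mixed", []), ("clear_non_stem", [])]).keys = ["clear_stem", "unclear_or_mixed", "clear_non_stem"] from rfl, hF]
    simp [List.foldl, PySem.Dict.insert, PySem.Dict.contains, PySem.Dict.getD, PySem.Dict.get?]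
theorem pv_sorted_set_eq {xs ys : List String} (hy : ys.Nodup)
    (h : ∀ a, a ∈ xs ↔ a ∈ ys) :
    PySem.List.sorted (PySem.Set.ofList xs) (fun x => x) = PySem.List.sorted ys (fun x => x) := by
  rw [PySem.List.sorted_id_eq_sorted_id_iff_perm,
      List.perm_ext_iff_of_nodup (PySem.Set.nodup_ofList xs) hy]
  intro a; rw [PySem.Set.mem_ofList]; exact h a

theorem pv_ins2 (v1 v0 v2 : PySem.Set String) :
    ((PySem.Dict.empty.insert "clear_stem" v1).insert "unclear_or_mixed" v0).insert "unclear_or_mixed" v2 =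
      PySem.Dict.mk [("clear_stem", v1), ("unclear_or_mixed", v2)] := rfl

theorem pv_getD2_cs (v1 v2 d : PySem.Set String) :
    (PySem.Dict.mk [("clear_stem", v1), ("unclear_or_mixed", v2)]).getD "clear_stem" d = v1 := rfl
theorem pv_getD2_um (v1 v2 d : PySem.Set String) :
    (PySem.Dict.mk [("clear_stem", v1), ("unclear_or_mixed", v2)]).getD "unclear_or_mixed" d = v2 := rfl
theorem pv_ins2_cs (v1 v2 w : PySem.Set String) :
    (PySem.Dict.mk [("clear_stem", v1), ("unclear_or_mixed", v2)]).insert "clear_stem" w =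
      PySem.Dict.mk [("clear_stem", w), ("unclear_or_mixed", v2)] := rfl
theorem pv_ins2_um (v1 v2 w : PySem.Set String) :
    (PySem.Dict.mk [("clear_stem", v1), ("unclear_or_mixed", v2)]).insert "unclear_or_mixed" w =
      PySem.Dict.mk [("clear_stem", v1), ("unclear_or_mixed", w)] := rfl
theorem pv_ins3 (v1 v0 v3 v2 : PySem.Set String) :
    ((((PySem.Dict.empty.insert "clear_stem" v1).insert "unclear_or_mixed" v0).insert "clear_non_stem" v3).insert "unclear_or_mixed" v2) =
      PySem.Dict.mk [("clear_stem", v1), ("unclear_or_mixed", v2), ("clear_non_stem", v3)] := rfl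
theorem pv_getD3_cs (v1 v2 v3 d : PySem.Set String) :
    (PySem.Dict.mk [("clear_stem", v1), ("unclear_or_mixed", v2), ("clear_non_stem", v3)]).getD "clear_stem" d = v1 := rfl
theorem pv_getD3_um (v1 v2 v3 d : PySem.Set String) :
    (PySem.Dict.mk [("clear_stem", v1), ("unclear_or_mixed", v2), ("clear_non_stem", v3)]).getD "unclear_or_mixed" d = v2 := rfl
theorem pv_getD3_cns (v1 v2 v3 d : PySem.Set String) :
    (PySem.Dict.mk [("clear_stem", v1), ("unclear_or_mixed", v2), ("clear_non_stem", v3)]).getD "clear_non_stem" d = v3 := rfl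
theorem pv_ins3_cs (v1 v2 v3 w : PySem.Set String) :
    (PySem.Dict.mk [("clear_stem", v1), ("unclear_or_mixed", v2), ("clear_non_stem", v3)]).insert "clear_stem" w =
      PySem.Dict.mk [("clear_stem", w), ("unclear_or_mixed", v2), ("clear_non_stem", v3)] := rfl
theorem pv_ins3_um (v1 v2 v3 w : PySem.Set String) :
    (PySem.Dict.mk [("clear_stem", v1), ("unclear_or_mixed", v2), ("clear_non_stem", v3)]).insert "unclear_or_mixed" w =
      PySem.Dict.mk [("clear_stem", v1), ("unclear_or_mixed", w), ("clear_non_stem", v3)] := rfl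
theorem pv_ins3_cns (v1 v2 v3 w : PySem.Set String) :
    (PySem.Dict.mk [("clear_stem", v1), ("unclear_or_mixed", v2), ("clear_non_stem", v3)]).insert "clear_non_stem" w =
      PySem.Dict.mk [("clear_stem", v1), ("unclear_or_mixed", v2), ("clear_non_stem", w)] := rfl

theorem pv_main (values : List String) (clear_stem clear_non_stem unclear_or_mixed : Option (List String)) (default_bucket : String) (include_clear_non_stem : Bool)
    (hpre : Pre_classify_values_py values clear_stem clear_non_stem unclear_or_mixed default_bucket include_clear_non_stem) :
    classify_values_py values clear_stem clear_non_stem unclear_or_mixed default_bucket include_clear_non_stem =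
    classify_values_py_alt values clear_stem clear_non_stem unclear_or_mixed default_bucket include_clear_non_stem := by
  rw [pv_A_closed values clear_stem clear_non_stem unclear_or_mixed default_bucket include_clear_non_stem hpre]
  cases include_clear_non_stem with
  | false =>
    unfold classify_values_py_alt
    simp only [Bool.false_eq_true, if_false]
    by_cases hr : (PySem.Set.diff
        (PySem.Set.diff (PySem.Set.ofList values) (PySem.Set.inter (PySem.Set.ofList values) (PySem.Set.ofList (clear_stem.getD []))))
        (PySem.Set.inter (PySem.Set.diff (PySem.Set.ofList values) (PySem.Set.inter (PySem.Set.ofList values) (PySem.Set.ofList (clear_stem.getD [])))) (PySem.Set.ofList (unclear_or_mixed.getD [])))).isEmpty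
    · rw [if_pos hr]
      rw [pv_ins2]
      have hall : ∀ a ∈ values, a ∈ clear_stem.getD [] ∨ a ∈ unclear_or_mixed.getD [] := by
        intro a ha
        by_contra hno
        rw [not_or] at hno
        rw [List.isEmpty_iff] at hr
        have : a ∈ ([] : List String) := by
          rw [← hr]
          simp [PySem.Set.mem_diff, PySem.Set.mem_inter, PySem.Set.mem_ofList, ha, hno.1, hno.2]
        simp at this
      simp only [PySem.Dict.items, List.map_cons, List.map_nil, List.cons.injEq, Prod.mk.injEq, true_and, and_true]
      constructor
      · apply pv_sorted_set_eq (PySem.Set.nodup_inter _ _ (PySem.Set.nodup_ofList values))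
        intro a
        by_cases hcs : a ∈ clear_stem.getD [] <;> by_cases hum : a ∈ unclear_or_mixed.getD [] <;>
          simp [pyBucket, List.mem_filter, PySem.Set.mem_inter, PySem.Set.mem_ofList, List.contains_iff_mem, hcs, hum] <;>
          exact fun h => (hall a h).elim (fun hx => absurd hx hcs) (fun hx => absurd hx hum)
      · apply pv_sorted_set_eq (PySem.Set.nodup_inter _ _ (PySem.Set.nodup_diff _ _ (PySem.Set.nodup_ofList values)))
        intro a
        by_cases hcs : a ∈ clear_stem.getD [] <;> by_cases hum : a ∈ unclear_or_mixed.getD [] <;>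
          simp [pyBucket, List.mem_filter, PySem.Set.mem_inter, PySem.Set.mem_diff, PySem.Set.mem_ofList, List.contains_iff_mem, hcs, hum] <;>
          exact fun h => (hall a h).elim (fun hx => absurd hx hcs) (fun hx => absurd hx hum)
    · rw [if_neg hr]
      rw [pv_ins2]
      rcases hpre with hd | hd | ⟨hb, _⟩ | hall4
      · subst hd
        rw [pv_getD2_cs, pv_ins2_cs]
        simp only [List.map_cons, List.map_nil, List.cons.injEq, Prod.mk.injEq, true_and, and_true]
        constructor
        · apply pv_sorted_set_eq (PySem.Set.nodup_union _ _ (PySem.Set.nodup_inter _ _ (PySem.Set.nodup_ofList values)))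
          intro a
          by_cases hcs : a ∈ clear_stem.getD [] <;> by_cases hum : a ∈ unclear_or_mixed.getD [] <;>
            simp [pyBucket, List.mem_filter, PySem.Set.mem_inter, PySem.Set.mem_diff, PySem.Set.mem_union, PySem.Set.mem_ofList, hcs, hum]
        · apply pv_sorted_set_eq (PySem.Set.nodup_inter _ _ (PySem.Set.nodup_diff _ _ (PySem.Set.nodup_ofList values)))
          intro a
          by_cases hcs : a ∈ clear_stem.getD [] <;> by_cases hum : a ∈ unclear_or_mixed.getD [] <;>
            simp [pyBucket, List.mem_filter, PySem.Set.mem_inter, PySem.Set.mem_diff, PySem.Set.mem_union, PySem.Set.mem_ofList, hcs, hum]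
      · subst hd
        rw [pv_getD2_um, pv_ins2_um]
        simp only [List.map_cons, List.map_nil, List.cons.injEq, Prod.mk.injEq, true_and, and_true]
        constructor
        · apply pv_sorted_set_eq (PySem.Set.nodup_inter _ _ (PySem.Set.nodup_ofList values))
          intro a
          by_cases hcs : a ∈ clear_stem.getD [] <;> by_cases hum : a ∈ unclear_or_mixed.getD [] <;>
            simp [pyBucket, List.mem_filter, PySem.Set.mem_inter, PySem.Set.mem_diff, PySem.Set.mem_union, PySem.Set.mem_ofList, hcs, hum]
        · apply pv_sorted_set_eq (PySem.Set.nodup_union _ _ (PySem.Set.nodup_inter _ _ (PySem.Set.nodup_diff _ _ (PySem.Set.nodup_ofList values))))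
          intro a
          by_cases hcs : a ∈ clear_stem.getD [] <;> by_cases hum : a ∈ unclear_or_mixed.getD [] <;>
            simp [pyBucket, List.mem_filter, PySem.Set.mem_inter, PySem.Set.mem_diff, PySem.Set.mem_union, PySem.Set.mem_ofList, hcs, hum]
      · simp at hb
      · exfalso
        apply hr
        rw [List.isEmpty_iff, List.eq_nil_iff_forall_not_mem]
        intro a ha
        simp only [PySem.Set.mem_diff, PySem.Set.mem_inter, PySem.Set.mem_ofList] at ha
        rcases hall4 a ha.1.1 with hc | ⟨hb, _⟩ | hc
        · exact ha.1.2 ⟨ha.1.1, hc⟩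
        · simp at hb
        · exact ha.2 ⟨ha.1, hc⟩
  | true =>
    unfold classify_values_py_alt
    simp only [if_true]
    set U := PySem.Set.ofList values with hU
    set csv := PySem.Set.inter U (PySem.Set.ofList (clear_stem.getD [])) with hcsv
    set r0 := PySem.Set.diff U csv with hr0
    set cnsv := PySem.Set.inter r0 (PySem.Set.ofList (clear_non_stem.getD [])) with hcnsv
    set r1 := PySem.Set.diff r0 cnsv with hr1
    set umv := PySem.Set.inter r1 (PySem.Set.ofList (unclear_or_mixed.getD [])) with humv
    set r2 := PySem.Set.diff r1 umv with hr2v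
    rw [pv_ins3]
    by_cases hr : r2.isEmpty
    · rw [if_pos hr]
      have hall : ∀ a ∈ values, a ∈ clear_stem.getD [] ∨ a ∈ clear_non_stem.getD [] ∨ a ∈ unclear_or_mixed.getD [] := by
        intro a ha
        by_contra hno
        rw [not_or, not_or] at hno
        rw [List.isEmpty_iff] at hr
        have : a ∈ ([] : List String) := by
          rw [← hr, hr2v, humv, hr1, hcnsv, hr0, hcsv, hU]
          simp [PySem.Set.mem_diff, PySem.Set.mem_inter, PySem.Set.mem_ofList, ha, hno.1, hno.2.1, hno.2.2]
        simp at this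
      rw [humv, hr1, hcnsv, hr0, hcsv, hU]
      simp only [List.map_cons, List.map_nil, List.cons.injEq, Prod.mk.injEq, true_and, and_true]
      refine ⟨?_, ?_, ?_⟩
      · apply pv_sorted_set_eq (PySem.Set.nodup_inter _ _ (PySem.Set.nodup_ofList values))
        intro a
        by_cases hcs : a ∈ clear_stem.getD [] <;> by_cases hcns : a ∈ clear_non_stem.getD [] <;> by_cases hum : a ∈ unclear_or_mixed.getD [] <;>
          simp [pyBucket, List.mem_filter, PySem.Set.mem_inter, PySem.Set.mem_diff, PySem.Set.mem_union, PySem.Set.mem_ofList, hcs, hcns, hum] <;>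
          exact fun h => (hall a h).elim (fun hx => absurd hx hcs) (fun hx => hx.elim (fun hy => absurd hy hcns) (fun hy => absurd hy hum))
      · apply pv_sorted_set_eq (PySem.Set.nodup_inter _ _ (PySem.Set.nodup_diff _ _ (PySem.Set.nodup_diff _ _ (PySem.Set.nodup_ofList values))))
        intro a
        by_cases hcs : a ∈ clear_stem.getD [] <;> by_cases hcns : a ∈ clear_non_stem.getD [] <;> by_cases hum : a ∈ unclear_or_mixed.getD [] <;>
          simp [pyBucket, List.mem_filter, PySem.Set.mem_inter, PySem.Set.mem_diff, PySem.Set.mem_union, PySem.Set.mem_ofList, hcs, hcns, hum] <;>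
          exact fun h => (hall a h).elim (fun hx => absurd hx hcs) (fun hx => hx.elim (fun hy => absurd hy hcns) (fun hy => absurd hy hum))
      · apply pv_sorted_set_eq (PySem.Set.nodup_inter _ _ (PySem.Set.nodup_diff _ _ (PySem.Set.nodup_ofList values)))
        intro a
        by_cases hcs : a ∈ clear_stem.getD [] <;> by_cases hcns : a ∈ clear_non_stem.getD [] <;> by_cases hum : a ∈ unclear_or_mixed.getD [] <;>
          simp [pyBucket, List.mem_filter, PySem.Set.mem_inter, PySem.Set.mem_diff, PySem.Set.mem_union, PySem.Set.mem_ofList, hcs, hcns, hum] <;>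
          exact fun h => (hall a h).elim (fun hx => absurd hx hcs) (fun hx => hx.elim (fun hy => absurd hy hcns) (fun hy => absurd hy hum))
    · rw [if_neg hr]
      rcases hpre with hd | hd | ⟨_, hd⟩ | hall4
      · subst hd
        rw [pv_getD3_cs, pv_ins3_cs]
        rw [hr2v, humv, hr1, hcnsv, hr0, hcsv, hU]
        simp only [List.map_cons, List.map_nil, List.cons.injEq, Prod.mk.injEq, true_and, and_true]
        refine ⟨?_, ?_, ?_⟩
        · apply pv_sorted_set_eq (PySem.Set.nodup_union _ _ (PySem.Set.nodup_inter _ _ (PySem.Set.nodup_ofList values)))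
          intro a
          by_cases hcs : a ∈ clear_stem.getD [] <;> by_cases hcns : a ∈ clear_non_stem.getD [] <;> by_cases hum : a ∈ unclear_or_mixed.getD [] <;>
            simp [pyBucket, List.mem_filter, PySem.Set.mem_inter, PySem.Set.mem_diff, PySem.Set.mem_union, PySem.Set.mem_ofList, hcs, hcns, hum]
        · apply pv_sorted_set_eq (PySem.Set.nodup_inter _ _ (PySem.Set.nodup_diff _ _ (PySem.Set.nodup_diff _ _ (PySem.Set.nodup_ofList values))))
          intro a
          by_cases hcs : a ∈ clear_stem.getD [] <;> by_cases hcns : a ∈ clear_non_stem.getD [] <;> by_cases hum : a ∈ unclear_or_mixed.getD [] <;>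
            simp [pyBucket, List.mem_filter, PySem.Set.mem_inter, PySem.Set.mem_diff, PySem.Set.mem_union, PySem.Set.mem_ofList, hcs, hcns, hum]
        · apply pv_sorted_set_eq (PySem.Set.nodup_inter _ _ (PySem.Set.nodup_diff _ _ (PySem.Set.nodup_ofList values)))
          intro a
          by_cases hcs : a ∈ clear_stem.getD [] <;> by_cases hcns : a ∈ clear_non_stem.getD [] <;> by_cases hum : a ∈ unclear_or_mixed.getD [] <;>
            simp [pyBucket, List.mem_filter, PySem.Set.mem_inter, PySem.Set.mem_diff, PySem.Set.mem_union, PySem.Set.mem_ofList, hcs, hcns, hum]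
      · subst hd
        rw [pv_getD3_um, pv_ins3_um]
        rw [hr2v, humv, hr1, hcnsv, hr0, hcsv, hU]
        simp only [List.map_cons, List.map_nil, List.cons.injEq, Prod.mk.injEq, true_and, and_true]
        refine ⟨?_, ?_, ?_⟩
        · apply pv_sorted_set_eq (PySem.Set.nodup_inter _ _ (PySem.Set.nodup_ofList values))
          intro a
          by_cases hcs : a ∈ clear_stem.getD [] <;> by_cases hcns : a ∈ clear_non_stem.getD [] <;> by_cases hum : a ∈ unclear_or_mixed.getD [] <;>
            simp [pyBucket, List.mem_filter, PySem.Set.mem_inter, PySem.Set.mem_diff, PySem.Set.mem_union, PySem.Set.mem_ofList, hcs, hcns, hum]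
        · apply pv_sorted_set_eq (PySem.Set.nodup_union _ _ (PySem.Set.nodup_inter _ _ (PySem.Set.nodup_diff _ _ (PySem.Set.nodup_diff _ _ (PySem.Set.nodup_ofList values)))))
          intro a
          by_cases hcs : a ∈ clear_stem.getD [] <;> by_cases hcns : a ∈ clear_non_stem.getD [] <;> by_cases hum : a ∈ unclear_or_mixed.getD [] <;>
            simp [pyBucket, List.mem_filter, PySem.Set.mem_inter, PySem.Set.mem_diff, PySem.Set.mem_union, PySem.Set.mem_ofList, hcs, hcns, hum]
        · apply pv_sorted_set_eq (PySem.Set.nodup_inter _ _ (PySem.Set.nodup_diff _ _ (PySem.Set.nodup_ofList values)))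
          intro a
          by_cases hcs : a ∈ clear_stem.getD [] <;> by_cases hcns : a ∈ clear_non_stem.getD [] <;> by_cases hum : a ∈ unclear_or_mixed.getD [] <;>
            simp [pyBucket, List.mem_filter, PySem.Set.mem_inter, PySem.Set.mem_diff, PySem.Set.mem_union, PySem.Set.mem_ofList, hcs, hcns, hum]
      · subst hd
        rw [pv_getD3_cns, pv_ins3_cns]
        rw [hr2v, humv, hr1, hcnsv, hr0, hcsv, hU]
        simp only [List.map_cons, List.map_nil, List.cons.injEq, Prod.mk.injEq, true_and, and_true]
        refine ⟨?_, ?_, ?_⟩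
        · apply pv_sorted_set_eq (PySem.Set.nodup_inter _ _ (PySem.Set.nodup_ofList values))
          intro a
          by_cases hcs : a ∈ clear_stem.getD [] <;> by_cases hcns : a ∈ clear_non_stem.getD [] <;> by_cases hum : a ∈ unclear_or_mixed.getD [] <;>
            simp [pyBucket, List.mem_filter, PySem.Set.mem_inter, PySem.Set.mem_diff, PySem.Set.mem_union, PySem.Set.mem_ofList, hcs, hcns, hum]
        · apply pv_sorted_set_eq (PySem.Set.nodup_inter _ _ (PySem.Set.nodup_diff _ _ (PySem.Set.nodup_diff _ _ (PySem.Set.nodup_ofList values))))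
          intro a
          by_cases hcs : a ∈ clear_stem.getD [] <;> by_cases hcns : a ∈ clear_non_stem.getD [] <;> by_cases hum : a ∈ unclear_or_mixed.getD [] <;>
            simp [pyBucket, List.mem_filter, PySem.Set.mem_inter, PySem.Set.mem_diff, PySem.Set.mem_union, PySem.Set.mem_ofList, hcs, hcns, hum]
        · apply pv_sorted_set_eq (PySem.Set.nodup_union _ _ (PySem.Set.nodup_inter _ _ (PySem.Set.nodup_diff _ _ (PySem.Set.nodup_ofList values))))
          intro a
          by_cases hcs : a ∈ clear_stem.getD [] <;> by_cases hcns : a ∈ clear_non_stem.getD [] <;> by_cases hum : a ∈ unclear_or_mixed.getD [] <;>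
            simp [pyBucket, List.mem_filter, PySem.Set.mem_inter, PySem.Set.mem_diff, PySem.Set.mem_union, PySem.Set.mem_ofList, hcs, hcns, hum]
      · exfalso
        apply hr
        rw [List.isEmpty_iff, List.eq_nil_iff_forall_not_mem, hr2v, humv, hr1, hcnsv, hr0, hcsv, hU]
        intro a ha
        simp only [PySem.Set.mem_diff, PySem.Set.mem_inter, PySem.Set.mem_ofList] at ha
        rcases hall4 a ha.1.1.1 with hc | ⟨_, hc⟩ | hc <;> tauto

-- ===== VERDICT (by name: the statement is the Claim_ definition above) =====
theorem classify_values_py_spec : Claim_equal_classify_values_py := by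
  intro values clear_stem clear_non_stem unclear_or_mixed default_bucket include_clear_non_stem _ hpre
  exact pv_main values clear_stem clear_non_stem unclear_or_mixed default_bucket include_clear_non_stem hpre
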